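-- pv_equiv track=rewrite | github.com/CreateRandom/summary-inspector-ingestion | utils/sentence_diff.py | get_unaccounted_ranges
-- ===== SOURCE A (Python) =====
-- def get_unaccounted_ranges(state_vector):
--     ranges = []
--     temp_ranges = []
--     for i, state in enumerate(state_vector):
--         if state == 'UNASSIGNED':
--             temp_ranges.append(i)
--         else:
--             if temp_ranges:
--                 ranges.append(temp_ranges)
--                 temp_ranges = []
--     # final flush
--     if temp_ranges:
--         ranges.append(temp_ranges)
--
--     return ranges
-- ===== SOURCE B (Python) =====
-- from itertools import groupby
--
-- def get_unaccounted_ranges(state_vector):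
--     result = []
--     for key, grp in groupby(enumerate(state_vector), key=lambda p: p[1] == 'UNASSIGNED'):
--         if key:
--             result.append([i for i, _ in grp])
--     return result
-- ===== Notes on version B (the rewrite author's own statement) =====
-- stated objective: idiomatic
-- what changed: Replaces the manual temp-buffer-and-flush accumulator loop by run segmentation: itertools.groupby over enumerate splits the vector into maximal constant runs of the key (state == 'UNASSIGNED') and the True runs are emitted directly.
import Mathlib
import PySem

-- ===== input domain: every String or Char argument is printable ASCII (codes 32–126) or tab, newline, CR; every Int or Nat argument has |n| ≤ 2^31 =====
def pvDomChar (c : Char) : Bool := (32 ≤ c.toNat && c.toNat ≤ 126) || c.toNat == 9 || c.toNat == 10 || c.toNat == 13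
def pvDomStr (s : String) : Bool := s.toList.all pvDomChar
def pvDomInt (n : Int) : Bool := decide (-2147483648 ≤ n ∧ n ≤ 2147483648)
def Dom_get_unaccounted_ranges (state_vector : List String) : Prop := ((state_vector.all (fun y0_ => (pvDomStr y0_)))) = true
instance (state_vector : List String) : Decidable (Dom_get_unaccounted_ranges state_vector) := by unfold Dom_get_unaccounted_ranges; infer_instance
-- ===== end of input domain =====

-- ===== PORT A =====
-- B groups maximal UNASSIGNED runs via run segmentation (groupby) instead of A's temp-buffer-and-flush loop; same O(n) cost.
-- step: the body of A's `for i, state in enumerate(...)` loop over state (ranges, temp_ranges)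
def pvStepA (st : List (List Int) × List Int) (p : Int × String) : List (List Int) × List Int :=
  if p.2 == "UNASSIGNED" then (st.1, st.2 ++ [p.1])
  else if st.2 ≠ [] then (st.1 ++ [st.2], ([] : List Int))
  else st

def get_unaccounted_ranges (state_vector : List String) : List (List Int) :=
  let st := (PySem.List.enumerate state_vector).foldl pvStepA ([], [])
  if st.2 ≠ [] then st.1 ++ [st.2] else st.1

-- ===== PORT B =====
-- groupby(enumerate(sv), key = p.2 == 'UNASSIGNED'): each maximal run with key True is emitted as its list of indices
def pvRunsB : List (Int × String) → List (List Int)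
  | [] => []
  | (i, s) :: rest =>
    if s == "UNASSIGNED" then
      (((i, s) :: rest.takeWhile (fun p => p.2 == "UNASSIGNED")).map Prod.fst)
        :: pvRunsB (rest.dropWhile (fun p => p.2 == "UNASSIGNED"))
    else pvRunsB rest
  termination_by xs => xs.length
  decreasing_by all_goals first | exact Nat.lt_succ_of_le (List.length_dropWhile_le _ _) | exact Nat.lt_succ_of_le (Nat.le_refl _)

def get_unaccounted_ranges_alt (state_vector : List String) : List (List Int) :=
  pvRunsB (PySem.List.enumerate state_vector)

-- ===== PRECONDITION & SPEC =====
def Spec_get_unaccounted_ranges (state_vector : List String) (out : List (List Int)) : Prop := out = get_unaccounted_ranges_alt state_vector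
instance (state_vector : List String) (out : List (List Int)) : Decidable (Spec_get_unaccounted_ranges state_vector out) := by unfold Spec_get_unaccounted_ranges; infer_instance

-- ===== CLAIM (what is proved, stated in full; the proofs are below) =====
def Claim_equal_get_unaccounted_ranges : Prop := ∀ (state_vector : List String), Dom_get_unaccounted_ranges state_vector → Spec_get_unaccounted_ranges state_vector (get_unaccounted_ranges state_vector)

-- ===== LEMMAS AND PROOFS =====

-- ===== VERDICT (by name: the statement is the Claim_ definition above) =====
-- G t xs: the ranges still to be produced when the pending temp buffer is t
def pvG (t : List Int) : List (Int × String) → List (List Int)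
  | [] => if t = [] then [] else [t]
  | (i, s) :: xs =>
    if s == "UNASSIGNED" then pvG (t ++ [i]) xs
    else if t = [] then pvG [] xs else t :: pvG [] xs

theorem pvFoldA (xs : List (Int × String)) : ∀ (r : List (List Int)) (t : List Int),
    (let st := xs.foldl pvStepA (r, t); if st.2 ≠ [] then st.1 ++ [st.2] else st.1)
      = r ++ pvG t xs := by
  induction xs with
  | nil => intro r t; by_cases h : t = [] <;> simp [pvG, h]
  | cons p xs ih =>
    intro r t
    obtain ⟨i, s⟩ := p
    by_cases hs : s == "UNASSIGNED"
    · simpa [pvStepA, pvG, hs] using ih r (t ++ [i])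
    · by_cases ht : t = []
      · simpa [pvStepA, pvG, hs, ht] using ih r []
      · simpa [pvStepA, pvG, hs, ht] using ih (r ++ [t]) []

theorem pvG_ne (xs : List (Int × String)) : ∀ (t : List Int), t ≠ [] →
    pvG t xs = (t ++ (xs.takeWhile (fun p => p.2 == "UNASSIGNED")).map Prod.fst)
      :: pvG [] (xs.dropWhile (fun p => p.2 == "UNASSIGNED")) := by
  induction xs with
  | nil => intro t ht; simp [pvG, ht]
  | cons p xs ih =>
    intro t ht
    obtain ⟨i, s⟩ := p
    by_cases hs : s == "UNASSIGNED"
    · rw [pvG, if_pos hs, ih (t ++ [i]) (by simp),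
        List.takeWhile_cons_of_pos (by simpa using hs),
        List.dropWhile_cons_of_pos (by simpa using hs)]
      simp
    · simp [pvG, hs, ht, List.takeWhile_cons, List.dropWhile_cons]

theorem pvRunsB_eq_pvG (xs : List (Int × String)) : pvRunsB xs = pvG [] xs := by
  induction xs using pvRunsB.induct with
  | case1 => simp [pvRunsB, pvG]
  | case2 i s rest hs ih =>
    rw [pvRunsB, if_pos hs, pvG, if_pos hs, show ([] : List Int) ++ [i] = [i] from rfl,
      pvG_ne _ [i] (by simp), ih]
    simp
  | case3 i s rest hs ih =>
    rw [pvRunsB, if_neg hs, pvG, if_neg hs, if_pos rfl, ih]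

theorem get_unaccounted_ranges_spec : Claim_equal_get_unaccounted_ranges := by
  intro sv _
  unfold Spec_get_unaccounted_ranges get_unaccounted_ranges get_unaccounted_ranges_alt
  rw [pvRunsB_eq_pvG]
  simpa using pvFoldA (PySem.List.enumerate sv) [] []
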